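-- pv_equiv track=rewrite | github.com/hj91k/study | example/ex1/algorithm/12.ROI Pooling.py | calcCropindex
-- ===== SOURCE A (Python) =====
-- def calcCropindex(start, end, divide):
--     a = int(int(end-start) / divide)
--     b = int(end-start) % divide
--
--     index = [0] * (divide+1)
--
--     for i in range(divide+1):
--         if i == 0:
--             index[i] = int(start)
--         elif i <= b:
--             index[i] = int(index[i-1] + a +1)
--         else :
--             index[i] = int(index[i-1] + a)
--     return index
-- ===== SOURCE B (Python) =====
-- def calcCropindex(start, end, divide):
--     # Closed form: no running accumulator; element i is start + i*a + min(i, b).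
--     a = int(int(end - start) / divide)
--     b = int(end - start) % divide
--     return [int(start) + i * a + min(i, b) for i in range(divide + 1)]
-- ===== Notes on version B (the rewrite author's own statement) =====
-- stated objective: simpler
-- what changed: Replaced the accumulator loop (each element computed from index[i-1]) with a direct closed-form list comprehension start + i*a + min(i,b), so no element depends on the previous one.
import Mathlib
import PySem

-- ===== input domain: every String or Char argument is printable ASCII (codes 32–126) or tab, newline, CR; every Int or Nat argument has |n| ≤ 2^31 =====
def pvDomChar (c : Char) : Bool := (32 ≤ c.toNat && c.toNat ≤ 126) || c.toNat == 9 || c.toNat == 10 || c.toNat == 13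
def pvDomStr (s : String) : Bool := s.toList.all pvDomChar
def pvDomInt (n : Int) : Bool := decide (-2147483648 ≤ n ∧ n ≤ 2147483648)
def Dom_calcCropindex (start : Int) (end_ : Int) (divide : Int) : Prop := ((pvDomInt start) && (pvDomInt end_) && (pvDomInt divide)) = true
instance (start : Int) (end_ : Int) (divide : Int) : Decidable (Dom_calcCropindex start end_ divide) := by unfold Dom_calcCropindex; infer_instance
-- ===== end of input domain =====

-- B replaces A's accumulator loop (index[i] computed from index[i-1]) by the closed form
-- start + i*a + min(i,b) built directly per index: simpler, no running state.

-- ===== PORT A =====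
-- 'int(int(end-start)/divide)' is float true division truncated toward zero; on Dom
-- |end_-start| ≤ 2^32 < 2^53, so PySem.Int.truncdiv is exact there.
def calcCropindex (start : Int) (end_ : Int) (divide : Int) : List Int :=
  let a := PySem.Int.truncdiv (end_ - start) divide
  let b := PySem.Int.mod (end_ - start) divide
  let index : List Int := List.replicate (divide + 1).toNat 0
  (PySem.List.pyRange 0 (divide + 1) 1).foldl
    (fun index i =>
      if i == 0 then PySem.List.pySetD index i start
      else if i ≤ b then
        PySem.List.pySetD index i (PySem.List.pyGetD index (i - 1) 0 + a + 1)
      else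
        PySem.List.pySetD index i (PySem.List.pyGetD index (i - 1) 0 + a))
    index

-- ===== PORT B =====
def calcCropindex_alt (start : Int) (end_ : Int) (divide : Int) : List Int :=
  let a := PySem.Int.truncdiv (end_ - start) divide
  let b := PySem.Int.mod (end_ - start) divide
  (PySem.List.pyRange 0 (divide + 1) 1).map (fun i => start + i * a + min i b)

-- ===== PRECONDITION & SPEC =====
-- A divides by 'divide' (ZeroDivisionError when divide == 0); nothing else raises.
def Pre_calcCropindex (start : Int) (end_ : Int) (divide : Int) : Prop := divide ≠ 0
instance (start : Int) (end_ : Int) (divide : Int) : Decidable (Pre_calcCropindex start end_ divide) := by unfold Pre_calcCropindex; infer_instance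
def pvWitness_calcCropindex : Int × Int × Int := (2, 13, 4)

def Spec_calcCropindex (start : Int) (end_ : Int) (divide : Int) (out : List Int) : Prop := out = calcCropindex_alt start end_ divide
instance (start : Int) (end_ : Int) (divide : Int) (out : List Int) : Decidable (Spec_calcCropindex start end_ divide out) := by unfold Spec_calcCropindex; infer_instance

-- ===== CLAIM (what is proved, stated in full; the proofs are below) =====
def Claim_equal_calcCropindex : Prop := ∀ (start : Int) (end_ : Int) (divide : Int), Dom_calcCropindex start end_ divide → Pre_calcCropindex start end_ divide → Spec_calcCropindex start end_ divide (calcCropindex start end_ divide)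

-- ===== LEMMAS AND PROOFS =====

-- A's loop body, with a and b fixed.
def cropStep (start a b : Int) (l : List Int) (i : Int) : List Int :=
  if i == 0 then PySem.List.pySetD l i start
  else if i ≤ b then
    PySem.List.pySetD l i (PySem.List.pyGetD l (i - 1) 0 + a + 1)
  else
    PySem.List.pySetD l i (PySem.List.pyGetD l (i - 1) 0 + a)

-- B's closed form.
def cropF (start a b i : Int) : Int := start + i * a + min i b

theorem pySetD_append_left {l t : List Int} {n : Nat} (h : n < l.length) (v : Int) :
    PySem.List.pySetD (l ++ t) (n : Int) v = PySem.List.pySetD l (n : Int) v ++ t := by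
  simp [PySem.List.pySetD_natCast, List.set_append_left, h]

theorem pyGetD_append_left {l t : List Int} {n : Nat} (h : n < l.length) (d : Int) :
    PySem.List.pyGetD (l ++ t) (n : Int) d = PySem.List.pyGetD l (n : Int) d := by
  simp [PySem.List.pyGetD_natCast, List.getD, List.getElem?_append_left h]

theorem cropStep_append {start a b : Int} {l t : List Int} {k : Nat}
    (hk : k < l.length) :
    cropStep start a b (l ++ t) (k : Int) = cropStep start a b l (k : Int) ++ t := by
  rcases Nat.eq_zero_or_pos k with h0 | h0
  · subst h0
    have h := pySetD_append_left (l := l) (t := t) (n := 0) hk start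
    simpa [cropStep] using h
  · have hk1 : k - 1 < l.length := by omega
    have hcast : ((k : Int) - 1) = ((k - 1 : Nat) : Int) := by omega
    have hne : ((k : Int) == 0) = false := by
      simp only [beq_eq_false_iff_ne, ne_eq]
      omega
    simp only [cropStep, hne, Bool.false_eq_true, if_false, hcast,
      pyGetD_append_left hk1, pySetD_append_left hk]
    split_ifs <;> rfl

theorem cropStep_length {start a b : Int} (l : List Int) (i : Int) :
    (cropStep start a b l i).length = l.length := by
  unfold cropStep; split_ifs <;> simp [PySem.List.length_pySetD]

-- the fold over in-range indices ignores an appended tail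
theorem crop_foldl_append (start a b : Int) : ∀ (ks : List Nat) (l t : List Int),
    (∀ k ∈ ks, k < l.length) →
    ((ks.map (fun k : Nat => (k : Int))).foldl (cropStep start a b) (l ++ t))
      = (ks.map (fun k : Nat => (k : Int))).foldl (cropStep start a b) l ++ t := by
  intro ks
  induction ks with
  | nil => intro l t _; rfl
  | cons k ks ihk =>
    intro l t hmem
    have hk : k < l.length := hmem k (by simp)
    simp only [List.map_cons, List.foldl_cons, cropStep_append hk]
    exact ihk _ t (by intro x hx; rw [cropStep_length]; exact hmem x (by simp [hx]))

-- Folding A's loop over indices 0..n on n+1 zeros yields B's closed form, pointwise.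
theorem crop_loop_closed (start a b : Int) (hb : 0 ≤ b) : ∀ n : Nat,
    ((List.range (n + 1)).map (fun k : Nat => (k : Int))).foldl (cropStep start a b)
        (List.replicate (n + 1) 0)
      = (List.range (n + 1)).map (fun k : Nat => cropF start a b (k : Int)) := by
  intro n
  induction n with
  | zero =>
    have h0 : min (0 : Int) b = 0 := min_eq_left hb
    simp [cropStep, cropF, PySem.List.pySetD_of_nonneg, h0]
  | succ n ih =>
    have hrange : List.range (n + 1 + 1) = List.range (n + 1) ++ [n + 1] := List.range_succ
    have hrep : List.replicate (n + 1 + 1) (0 : Int)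
        = List.replicate (n + 1) (0 : Int) ++ [0] := by
      rw [← List.replicate_succ']
    have hlen : ∀ k ∈ List.range (n + 1), k < (List.replicate (n + 1) (0 : Int)).length := by
      intro k hk; simpa using List.mem_range.mp hk
    rw [hrange, hrep, List.map_append, List.foldl_append,
      crop_foldl_append start a b _ _ _ hlen, ih]
    -- one remaining step, at index n+1, acting on L ++ [0] where L is the closed form so far
    have hL : ((List.range (n + 1)).map (fun k : Nat => cropF start a b (k : Int))).length
        = n + 1 := by simp
    have hget :
        PySem.List.pyGetD
            ((List.range (n + 1)).map (fun k : Nat => cropF start a b (k : Int)) ++ [0])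
            (((n + 1 : Nat) : Int) - 1) 0 = cropF start a b (n : Int) := by
      have hcast : (((n + 1 : Nat) : Int) - 1) = ((n : Nat) : Int) := by push_cast; ring
      rw [hcast, pyGetD_append_left (by simp : n < _)]
      rw [PySem.List.pyGetD_natCast]
      simp [List.getD]
    have hset : ∀ v : Int,
        PySem.List.pySetD
            ((List.range (n + 1)).map (fun k : Nat => cropF start a b (k : Int)) ++ [0])
            ((n + 1 : Nat) : Int) v
          = (List.range (n + 1)).map (fun k : Nat => cropF start a b (k : Int)) ++ [v] := by
      intro v
      rw [PySem.List.pySetD_natCast, List.set_append_right _ _ (by omega)]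
      simp
    have hne : (((n + 1 : Nat) : Int) == 0) = false := by
      simp only [beq_eq_false_iff_ne, ne_eq]; push_cast; omega
    have hmul : ((n + 1 : Nat) : Int) * a = (n : Int) * a + a := by push_cast; ring
    simp only [List.map_cons, List.map_nil, List.foldl_cons, List.foldl_nil,
      cropStep, hne, Bool.false_eq_true, if_false, hget, hset]
    by_cases hcase : ((n + 1 : Nat) : Int) ≤ b
    · rw [if_pos hcase]
      have hv : cropF start a b (n : Int) + a + 1 = cropF start a b ((n + 1 : Nat) : Int) := by
        simp only [cropF, hmul]
        omega
      rw [hv]; simp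
    · rw [if_neg hcase]
      have hv : cropF start a b (n : Int) + a = cropF start a b ((n + 1 : Nat) : Int) := by
        simp only [cropF, hmul]
        omega
      rw [hv]; simp

-- ===== VERDICT (by name: the statement is the Claim_ definition above) =====
theorem calcCropindex_spec : Claim_equal_calcCropindex := by
  intro start end_ divide _ hpre
  unfold Spec_calcCropindex calcCropindex calcCropindex_alt
  rcases lt_or_gt_of_ne hpre with hneg | hpos
  · -- divide ≤ -1: empty range, empty replicate
    have h1 : PySem.List.pyRange 0 (divide + 1) 1 = [] :=
      PySem.List.pyRange_one_eq_nil (by omega)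
    have h2 : (divide + 1).toNat = 0 := by omega
    simp [h1, h2]
  · -- divide ≥ 1
    have hb : 0 ≤ PySem.Int.mod (end_ - start) divide := PySem.Int.mod_nonneg _ hpos
    obtain ⟨n, hn⟩ : ∃ n : Nat, divide = (n : Int) + 1 := ⟨(divide - 1).toNat, by omega⟩
    have hrange : PySem.List.pyRange 0 (divide + 1) 1
        = (List.range (n + 1 + 1)).map (fun k : Nat => (k : Int)) := by
      rw [PySem.List.pyRange_one]
      have h3 : (divide + 1 - 0).toNat = n + 1 + 1 := by omega
      rw [h3]
      simp
    have hrep : (divide + 1).toNat = n + 1 + 1 := by omega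
    rw [hrange, hrep]
    have hmain := crop_loop_closed start (PySem.Int.truncdiv (end_ - start) divide)
      (PySem.Int.mod (end_ - start) divide) hb (n + 1)
    rw [show ((List.range (n + 1 + 1)).map (fun k : Nat => (k : Int))).foldl
        (fun index i =>
          if i == 0 then PySem.List.pySetD index i start
          else if i ≤ PySem.Int.mod (end_ - start) divide then
            PySem.List.pySetD index i (PySem.List.pyGetD index (i - 1) 0 + PySem.Int.truncdiv (end_ - start) divide + 1)
          else
            PySem.List.pySetD index i (PySem.List.pyGetD index (i - 1) 0 + PySem.Int.truncdiv (end_ - start) divide))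
        (List.replicate (n + 1 + 1) 0)
      = ((List.range (n + 1 + 1)).map (fun k : Nat => (k : Int))).foldl
        (cropStep start (PySem.Int.truncdiv (end_ - start) divide) (PySem.Int.mod (end_ - start) divide))
        (List.replicate (n + 1 + 1) 0) from rfl, hmain]
    simp [cropF]
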